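-- pv_equiv track=rewrite | github.com/guo-ou/6.009 | quiz2_dir/q2_problems/test_file.py | create_all
-- ===== SOURCE A (Python) =====
-- def create_all(numbers):
--
--
--     def helper(remaining_numbers, out_set=None):
--         if out_set is None:
--             out_set = set(numbers)
--
--         if remaining_numbers == []:
--             return out_set
--
--         working_num = remaining_numbers[0]
--
--         for value in set(out_set):
--              out_set.add(value + working_num)
--              out_set.add(value - working_num)
--              out_set.add(value * working_num)
--              out_set.add(value // working_num)
--
--         return helper(remaining_numbers[1:], out_set)
--
--     return helper(numbers)
-- ===== SOURCE B (Python) =====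
-- def create_all(numbers):
--     out_set = set(numbers)
--     for working_num in numbers:
--         additions = [r for value in set(out_set)
--                        for r in (value + working_num,
--                                  value - working_num,
--                                  value * working_num,
--                                  value // working_num)]
--         out_set.update(additions)
--     return out_set
-- ===== Notes on version B (the rewrite author's own statement) =====
-- stated objective: simpler
-- what changed: Replaces the nested recursive helper with default-argument accumulator threading by a flat iterative loop that builds each round's additions as one comprehension and updates the set once; Pre_ excludes lists containing 0, on which both programs raise ZeroDivisionError.
import Mathlib
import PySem

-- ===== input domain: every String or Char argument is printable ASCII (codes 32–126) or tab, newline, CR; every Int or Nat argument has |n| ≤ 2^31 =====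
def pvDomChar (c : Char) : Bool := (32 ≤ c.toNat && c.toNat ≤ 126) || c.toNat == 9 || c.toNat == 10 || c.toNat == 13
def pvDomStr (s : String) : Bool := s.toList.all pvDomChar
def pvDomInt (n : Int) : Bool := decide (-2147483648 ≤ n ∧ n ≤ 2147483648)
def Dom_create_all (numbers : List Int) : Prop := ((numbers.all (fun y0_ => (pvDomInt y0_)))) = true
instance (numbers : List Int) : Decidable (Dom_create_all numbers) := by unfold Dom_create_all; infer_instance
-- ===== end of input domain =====

-- B replaces A's recursive helper (with default-argument accumulator threading) by a flat
-- iterative loop building each round's additions as one list and updating the set once (simpler).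
-- Both programs raise ZeroDivisionError when 0 ∈ numbers; Pre_ excludes exactly those inputs.

-- ===== PORT A =====
-- helper(remaining_numbers, out_set): recursion on the remaining list, threading the set
def createAllHelper : List Int → PySem.Set Int → PySem.Set Int
  | [], out => out
  | working_num :: rest, out =>
      -- 'for value in set(out_set): out_set.add(…) ×4' (snapshot of the set)
      let out' := (PySem.Set.ofList out).foldl
        (fun s value =>
          ((((s.add (value + working_num)).add (value - working_num)).add
              (value * working_num)).add (PySem.Int.floordiv value working_num)))
        out
      createAllHelper rest out'

def create_all (numbers : List Int) : List Int :=
  createAllHelper numbers (PySem.Set.ofList numbers)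

-- ===== PORT B =====
def create_all_alt (numbers : List Int) : List Int :=
  numbers.foldl
    (fun out working_num =>
      -- additions = [r for value in set(out_set) for r in (v+w, v-w, v*w, v//w)]
      let additions := (PySem.Set.ofList out).flatMap
        (fun value => [value + working_num, value - working_num,
                       value * working_num, PySem.Int.floordiv value working_num])
      -- out_set.update(additions)
      PySem.Set.update out additions)
    (PySem.Set.ofList numbers)

-- ===== PRECONDITION & SPEC =====
-- Pre_ excludes lists containing 0: there both Pythons raise ZeroDivisionError (value // 0).
def Pre_create_all (numbers : List Int) : Prop := (0 : Int) ∉ numbers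
instance (numbers : List Int) : Decidable (Pre_create_all numbers) := by unfold Pre_create_all; infer_instance

def pvWitness_create_all : List Int := [1, -2, 3]

def Spec_create_all (numbers : List Int) (out : List Int) : Prop := out = create_all_alt numbers
instance (numbers : List Int) (out : List Int) : Decidable (Spec_create_all numbers out) := by unfold Spec_create_all; infer_instance

-- ===== CLAIM (what is proved, stated in full; the proofs are below) =====
def Claim_equal_create_all : Prop := ∀ (numbers : List Int), Dom_create_all numbers → Pre_create_all numbers → Spec_create_all numbers (create_all numbers)

-- ===== LEMMAS AND PROOFS =====

-- one round: the four sequential adds over the snapshot = one update with the flat additions list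
theorem createAll_step_eq (out : PySem.Set Int) (w : Int) :
    (PySem.Set.ofList out).foldl
      (fun s v => ((((s.add (v + w)).add (v - w)).add (v * w)).add (PySem.Int.floordiv v w)))
      out
    = PySem.Set.update out
        ((PySem.Set.ofList out).flatMap
          (fun v => [v + w, v - w, v * w, PySem.Int.floordiv v w])) := by
  unfold PySem.Set.update
  generalize PySem.Set.ofList out = snap
  induction snap generalizing out with
  | nil => rfl
  | cons v t ih => simp [List.flatMap_cons, List.foldl, ih]

theorem createAllHelper_eq_foldl (rem : List Int) (out : PySem.Set Int) :
    createAllHelper rem out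
    = rem.foldl
        (fun out working_num =>
          PySem.Set.update out
            ((PySem.Set.ofList out).flatMap
              (fun value => [value + working_num, value - working_num,
                             value * working_num, PySem.Int.floordiv value working_num])))
        out := by
  induction rem generalizing out with
  | nil => rfl
  | cons w rest ih => simp [createAllHelper, createAll_step_eq, ih]

-- ===== VERDICT (by name: the statement is the Claim_ definition above) =====
theorem create_all_spec : Claim_equal_create_all := by
  intro numbers _ _
  unfold Spec_create_all create_all create_all_alt
  exact createAllHelper_eq_foldl numbers (PySem.Set.ofList numbers)
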